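-- pv_equiv track=rewrite | github.com/fredjeong/coding-test-prep | 프로그래머스/0/120869. 외계어 사전/외계어 사전.py | solution
-- ===== SOURCE A (Python) =====
-- def solution(spell, dic):
--     answer = 2
--     temp = 0
--     for word in dic:
--         for character in spell:
--             if word.count(character) >= 1:
--                 temp += 1
--                 if temp == len(spell):
--                     answer = 1
--         temp = 0
--
--     return answer
-- ===== SOURCE B (Python) =====
-- def solution(spell, dic):
--     # Inverted nesting: loop over spell entries, narrowing a surviving-candidates
--     # list of dictionary words; empty spell never matches (as in A).
--     if not spell:
--         return 2
--     candidates = dic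
--     for ch in spell:
--         candidates = [w for w in candidates if ch in w]
--         if not candidates:
--             return 2
--     return 1
-- ===== Notes on version B (the rewrite author's own statement) =====
-- stated objective: alternative
-- what changed: Inverted the loop nesting: instead of A's per-word inner scan over spell with a temp counter, B iterates over spell outermost, filtering a surviving-candidates list of dictionary words (intersection of per-character filters) and exiting early once no candidate survives.
import Mathlib
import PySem

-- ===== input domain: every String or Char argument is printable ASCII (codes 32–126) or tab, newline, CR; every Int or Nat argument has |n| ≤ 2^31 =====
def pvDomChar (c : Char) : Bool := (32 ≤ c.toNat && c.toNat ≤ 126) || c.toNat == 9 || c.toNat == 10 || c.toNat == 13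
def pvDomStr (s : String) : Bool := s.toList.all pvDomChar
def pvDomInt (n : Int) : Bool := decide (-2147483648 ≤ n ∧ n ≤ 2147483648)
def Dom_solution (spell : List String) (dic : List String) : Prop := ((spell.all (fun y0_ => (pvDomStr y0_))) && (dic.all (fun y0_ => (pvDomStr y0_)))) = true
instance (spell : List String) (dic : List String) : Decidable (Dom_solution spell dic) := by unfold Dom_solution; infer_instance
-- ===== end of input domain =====

-- B inverts the loop nesting: it iterates over spell, filtering a surviving-candidates list of words
-- with early exit, instead of A's per-word counter scan; objective: alternative.

-- ===== PORT A =====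
-- state = (answer, temp); temp is reset to 0 after each word, exactly as in A
def solution (spell : List String) (dic : List String) : Int :=
  (dic.foldl
    (fun (st : Int × Int) word =>
      let inner := spell.foldl
        (fun (p : Int × Int) character =>
          if PySem.Str.count word character ≥ 1 then
            (if p.2 + 1 = (spell.length : Int) then 1 else p.1, p.2 + 1)
          else p) st
      (inner.1, 0))
    (2, 0)).1

-- ===== PORT B =====
-- the for-loop over spell with the shrinking candidates list and early return
def solutionAltGo (spell : List String) (cands : List String) : Int :=
  match spell with
  | [] => 1
  | ch :: rest =>
    let cands' := cands.filter (fun w => PySem.Str.isIn ch w)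
    if cands'.isEmpty then 2 else solutionAltGo rest cands'

def solution_alt (spell : List String) (dic : List String) : Int :=
  if spell.isEmpty then 2 else solutionAltGo spell dic

-- ===== PRECONDITION & SPEC =====
def Spec_solution (spell : List String) (dic : List String) (out : Int) : Prop := out = solution_alt spell dic
instance (spell : List String) (dic : List String) (out : Int) : Decidable (Spec_solution spell dic out) := by unfold Spec_solution; infer_instance

-- ===== CLAIM (what is proved, stated in full; the proofs are below) =====
def Claim_equal_solution : Prop := ∀ (spell : List String) (dic : List String), Dom_solution spell dic → Spec_solution spell dic (solution spell dic)

-- ===== LEMMAS AND PROOFS =====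

-- count.go never decreases the accumulator
theorem count_go_le (sub : List Char) : ∀ (fuel : Nat) (s : List Char) (acc : Nat),
    acc ≤ PySem.Chars.count.go sub fuel s acc := by
  intro fuel
  induction fuel with
  | zero => intro s acc; simp [PySem.Chars.count.go]
  | succ f ih =>
    intro s acc
    cases s with
    | nil => simp [PySem.Chars.count.go]
    | cons h t =>
      simp only [PySem.Chars.count.go]
      split
      · exact le_trans (Nat.le_succ acc) (ih _ _)
      · exact ih t acc

-- with enough fuel, go leaves acc unchanged iff sub does not occur
theorem count_go_eq_iff (sub : List Char) (hsub : sub ≠ []) :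
    ∀ (fuel : Nat) (s : List Char) (acc : Nat), s.length ≤ fuel →
    (PySem.Chars.count.go sub fuel s acc = acc ↔ ¬ sub <:+: s) := by
  intro fuel
  induction fuel with
  | zero =>
    intro s acc hl
    have : s = [] := List.eq_nil_of_length_eq_zero (Nat.le_zero.mp hl)
    subst this
    simp [PySem.Chars.count.go, List.infix_nil, hsub]
  | succ f ih =>
    intro s acc hl
    cases s with
    | nil =>
      simp [PySem.Chars.count.go, List.infix_nil, hsub]
    | cons h t =>
      simp only [PySem.Chars.count.go]
      split
      · rename_i hpre
        constructor
        · intro heq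
          have := count_go_le sub f (List.drop sub.length (h :: t)) (acc + 1)
          omega
        · intro hinf
          exfalso
          exact hinf ((List.isPrefixOf_iff_prefix.mp hpre).isInfix)
      · rename_i hpre
        have ht : t.length ≤ f := by simpa using Nat.lt_succ_iff.mp (by simpa using Nat.lt_of_lt_of_le (by simp) hl)
        rw [ih t acc (by simpa using hl)]
        rw [List.infix_cons_iff]
        constructor
        · intro hn h'
          cases h' with
          | inl hp => exact hpre (List.isPrefixOf_iff_prefix.mpr hp)
          | inr hi => exact hn hi
        · intro hn hi; exact hn (Or.inr hi)

-- word.count(c) >= 1  ↔  c in word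
theorem count_pos_iff_isIn (word c : String) :
    (1 ≤ PySem.Str.count word c) ↔ PySem.Str.isIn c word = true := by
  rw [PySem.Str.count_eq, PySem.Str.isIn_eq, PySem.Chars.isIn_iff_infix]
  by_cases hc : c.toList = []
  · simp [PySem.Chars.count, hc]
  · have hni : c.toList.isEmpty = false := by simp [hc]
    unfold PySem.Chars.count
    rw [hni]
    simp only [Bool.false_eq_true, if_false]
    have h := count_go_eq_iff c.toList hc word.toList.length word.toList 0 le_rfl
    constructor
    · intro h1
      by_contra hn
      have := h.mpr hn
      omega
    · intro hinf
      have : PySem.Chars.count.go c.toList word.toList.length word.toList 0 ≠ 0 := by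
        intro h0; exact (h.mp h0) hinf
      omega

-- the inner loop over spell, characterised
theorem inner_fold (word : String) (n : Int) :
    ∀ (l : List String) (ans t : Int),
    l.foldl (fun (p : Int × Int) character =>
        if PySem.Str.count word character ≥ 1 then
          (if p.2 + 1 = n then 1 else p.1, p.2 + 1)
        else p) (ans, t)
    = (if t < n ∧ n ≤ t + (l.countP (fun c => decide (1 ≤ PySem.Str.count word c)) : Int) then 1 else ans,
       t + (l.countP (fun c => decide (1 ≤ PySem.Str.count word c)) : Int)) := by
  intro l
  induction l with
  | nil =>
    intro ans t
    simp only [List.foldl_nil, List.countP_nil, Nat.cast_zero, add_zero]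
    congr 1
    rw [if_neg]; omega
  | cons c l ih =>
    intro ans t
    simp only [List.foldl_cons]
    by_cases hc : 1 ≤ PySem.Str.count word c
    · rw [if_pos (by exact hc)]
      rw [ih]
      have hcnt : ((c :: l).countP (fun c => decide (1 ≤ PySem.Str.count word c)) : Int)
          = (l.countP (fun c => decide (1 ≤ PySem.Str.count word c)) : Int) + 1 := by
        rw [show (c :: l).countP (fun c => decide (1 ≤ PySem.Str.count word c))
            = l.countP (fun c => decide (1 ≤ PySem.Str.count word c)) + 1 from by
          rw [List.countP_cons, if_pos (by simpa using hc)]]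
        push_cast; ring
      rw [hcnt]
      have hm : (0 : Int) ≤ (l.countP (fun c => decide (1 ≤ PySem.Str.count word c)) : Int) := by positivity
      by_cases h1 : t + 1 = n
      · rw [if_pos h1]
        congr 1
        · rw [if_neg (by omega), if_pos (by omega)]
        · omega
      · rw [if_neg h1]
        congr 1
        · by_cases h2 : t + 1 < n ∧ n ≤ t + 1 + (l.countP (fun c => decide (1 ≤ PySem.Str.count word c)) : Int)
          · rw [if_pos h2, if_pos (by omega)]
          · rw [if_neg h2, if_neg (by omega)]
        · omega
    · rw [if_neg (by exact hc)]
      rw [ih]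
      have hcnt : ((c :: l).countP (fun c => decide (1 ≤ PySem.Str.count word c)) : Int)
          = (l.countP (fun c => decide (1 ≤ PySem.Str.count word c)) : Int) := by
        rw [List.countP_cons, if_neg (by simpa using hc)]
        simp
      rw [hcnt]

-- per-word verdict: the inner loop sets answer to 1 iff spell ≠ [] and every entry occurs in word
theorem inner_verdict (word : String) (spell : List String) (ans : Int) :
    (spell.foldl (fun (p : Int × Int) character =>
        if PySem.Str.count word character ≥ 1 then
          (if p.2 + 1 = (spell.length : Int) then 1 else p.1, p.2 + 1)
        else p) (ans, 0)).1
    = if (!spell.isEmpty && spell.all (fun c => PySem.Str.isIn c word)) = true then 1 else ans := by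
  rw [inner_fold word (spell.length : Int) spell ans 0]
  simp only []
  have hle : spell.countP (fun c => decide (1 ≤ PySem.Str.count word c)) ≤ spell.length :=
    List.countP_le_length
  by_cases hall : spell.all (fun c => PySem.Str.isIn c word) = true
  · have : spell.countP (fun c => decide (1 ≤ PySem.Str.count word c)) = spell.length := by
      rw [List.countP_eq_length]
      intro a ha
      exact decide_eq_true ((count_pos_iff_isIn word a).mpr (List.all_eq_true.mp hall a ha))
    rw [this]
    by_cases hne : spell.isEmpty
    · rw [List.isEmpty_iff] at hne
      subst hne
      simp
    · simp only [hne, Bool.not_false, Bool.true_and, hall, if_pos]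
      rw [if_pos]
      constructor
      · have : spell.length ≠ 0 := by
          intro h; exact hne (List.isEmpty_iff.mpr (List.eq_nil_of_length_eq_zero h))
        omega
      · omega
  · have hlt : spell.countP (fun c => decide (1 ≤ PySem.Str.count word c)) < spell.length := by
      rcases Nat.lt_or_ge (spell.countP (fun c => decide (1 ≤ PySem.Str.count word c))) spell.length with h | h
      · exact h
      · exfalso
        apply hall
        rw [List.all_eq_true]
        intro a ha
        have hb := List.countP_eq_length.mp (le_antisymm hle h) a ha
        exact (count_pos_iff_isIn word a).mp (of_decide_eq_true hb)
    rw [if_neg (by omega)]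
    rw [if_neg (fun h => hall (Bool.and_elim_right h))]

-- the outer loop of A returns 1 iff some word matched
theorem outer_fold (spell : List String) :
    ∀ (dic : List String) (ans : Int),
    (dic.foldl
      (fun (st : Int × Int) word =>
        let inner := spell.foldl
          (fun (p : Int × Int) character =>
            if PySem.Str.count word character ≥ 1 then
              (if p.2 + 1 = (spell.length : Int) then 1 else p.1, p.2 + 1)
            else p) st
        (inner.1, 0))
      (ans, 0)).1
    = if dic.any (fun word => !spell.isEmpty && spell.all (fun c => PySem.Str.isIn c word)) then 1 else ans := by
  intro dic
  induction dic with
  | nil => intro ans; simp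
  | cons w dic ih =>
    intro ans
    simp only [List.foldl_cons, List.any_cons]
    rw [ih]
    rw [inner_verdict w spell ans]
    rcases Bool.eq_false_or_eq_true (!spell.isEmpty && spell.all (fun c => PySem.Str.isIn c w)) with h1 | h1 <;>
      rcases Bool.eq_false_or_eq_true (dic.any (fun word => !spell.isEmpty && spell.all (fun c => PySem.Str.isIn c word))) with h2 | h2 <;>
      simp only [h1, h2] <;> simp

-- B's candidate-filtering loop, characterised (for nonempty spell)
theorem altGo_eq : ∀ (spell : List String), spell ≠ [] → ∀ (cands : List String),
    solutionAltGo spell cands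
    = if cands.any (fun w => spell.all (fun c => PySem.Str.isIn c w)) then 1 else 2 := by
  intro spell
  induction spell with
  | nil => intro h; exact absurd rfl h
  | cons ch rest ih =>
    intro _ cands
    show (if (cands.filter (fun w => PySem.Str.isIn ch w)).isEmpty then 2
          else solutionAltGo rest (cands.filter (fun w => PySem.Str.isIn ch w))) = _
    by_cases he : (cands.filter (fun w => PySem.Str.isIn ch w)).isEmpty
    · rw [if_pos he, if_neg]
      simp only [List.isEmpty_iff, List.filter_eq_nil_iff] at he
      simp only [List.any_eq_true, List.all_cons, Bool.and_eq_true, not_exists]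
      rintro w ⟨hm, hin, -⟩
      exact absurd hin (by simpa using he w hm)
    · rw [if_neg he]
      cases rest with
      | nil =>
        rw [if_pos]
        · simp [solutionAltGo]
        · simp only [List.isEmpty_iff] at he
          rcases List.exists_mem_of_ne_nil _ he with ⟨w, hw⟩
          rcases List.mem_filter.mp hw with ⟨hm, hp⟩
          exact List.any_eq_true.mpr ⟨w, hm, by simp [-PySem.Str.isIn_eq, hp]⟩
      | cons c r =>
        rw [ih (by simp) (cands.filter (fun w => PySem.Str.isIn ch w))]
        congr 1
        simp only [List.any_eq_true, List.mem_filter, List.all_cons, Bool.and_eq_true,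
          eq_iff_iff]
        constructor
        · rintro ⟨w, ⟨hm, hp⟩, hq⟩; exact ⟨w, hm, hp, hq⟩
        · rintro ⟨w, hm, hp, hq⟩; exact ⟨w, ⟨hm, hp⟩, hq⟩

-- ===== VERDICT (by name: the statement is the Claim_ definition above) =====
theorem solution_spec : Claim_equal_solution := by
  intro spell dic _
  unfold Spec_solution solution solution_alt
  rw [outer_fold spell dic 2]
  cases spell with
  | nil => simp
  | cons ch rest =>
    rw [altGo_eq (ch :: rest) (by simp) dic]
    simp
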